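-- pv_equiv track=rewrite | github.com/MrBrantCode/unitest_baseline | mut_generate/mist_train_cf/cf_95110/solution.py | prime_index_and_value
-- ===== SOURCE A (Python) =====
-- def prime_index_and_value(arr):
--     def is_prime(num):
--         if num < 2:
--             return False
--         for i in range(2, int(num ** 0.5) + 1):
--             if num % i == 0:
--                 return False
--         return True
--
--     return [element for index, element in enumerate(arr) if is_prime(index) and is_prime(element)]
-- ===== SOURCE B (Python) =====
-- def prime_index_and_value(arr):
--     # Largest number whose primality we may need: the last index or the largest value.
--     hi = max([len(arr) - 1] + arr)
--     # Integer square root of hi by counting up (hi may be negative for empty input).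
--     root = 0
--     while (root + 1) * (root + 1) <= hi:
--         root += 1
--     # Build, once, the ascending list of all primes <= root by trial division
--     # against the primes already found (a composite k has a prime factor p with p*p <= k).
--     primes = []
--     for k in range(2, root + 1):
--         if trial(primes, k):
--             primes.append(k)
--
--     out = []
--     for index, element in enumerate(arr):
--         if (index >= 2 and trial(primes, index)) and (element >= 2 and trial(primes, element)):
--             out.append(element)
--     return out
--
--
-- def trial(primes, num):
--     # num >= 2; primes holds every prime p with p*p <= num, in ascending order.
--     for p in primes:
--         if p * p > num:
--             break
--         if num % p == 0:
--             return False
--     return True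
-- ===== Notes on version B (the rewrite author's own statement) =====
-- stated objective: faster
-- what changed: A runs trial division by every integer up to a float square root separately for each index and each element; B precomputes one ascending list of primes up to isqrt(max(len(arr)-1, max(arr))) and tests each number by dividing only by those primes, breaking once p*p exceeds it.
import Mathlib
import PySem

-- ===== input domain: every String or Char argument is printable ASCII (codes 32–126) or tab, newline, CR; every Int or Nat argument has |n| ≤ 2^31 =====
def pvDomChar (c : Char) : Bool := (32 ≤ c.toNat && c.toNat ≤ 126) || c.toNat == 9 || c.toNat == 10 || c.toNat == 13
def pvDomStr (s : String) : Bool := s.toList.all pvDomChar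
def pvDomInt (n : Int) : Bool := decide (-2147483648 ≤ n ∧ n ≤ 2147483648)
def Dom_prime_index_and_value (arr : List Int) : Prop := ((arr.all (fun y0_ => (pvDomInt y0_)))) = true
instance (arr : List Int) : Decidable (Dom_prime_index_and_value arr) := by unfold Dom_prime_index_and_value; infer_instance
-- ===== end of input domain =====

-- B replaces A's per-element trial division by all integers up to a float square root
-- with one precomputed ascending prime list (primes up to isqrt of the largest needed
-- number) and trial division by those primes only, with an early break at p*p > num.

-- ===== PORT A =====
-- A's is_prime: trial division by every i in range(2, int(num**0.5)+1).
-- int(num ** 0.5) is ported as Nat.sqrt num.toNat: exact for 0 ≤ num ≤ 2^31 (the Dom bound),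
-- where the double sqrt rounds to the integer square root; num ≥ 2 on this branch.
def aIsPrime (num : Int) : Bool :=
  if num < 2 then false
  else if (PySem.List.pyRange 2 ((Nat.sqrt num.toNat : Int) + 1) 1).any
            (fun i => PySem.Int.mod num i == 0) then false
  else true

def prime_index_and_value (arr : List Int) : List Int :=
  ((PySem.List.enumerate arr).filter (fun iv => aIsPrime iv.1 && aIsPrime iv.2)).map (·.2)

-- ===== PORT B =====
-- Source B's trial(primes, num): divide by the stored primes, breaking once p*p > num.
def bTrial (primes : List Int) (num : Int) : Bool :=
  match primes with
  | [] => true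
  | p :: ps =>
      if p * p > num then true
      else if PySem.Int.mod num p == 0 then false
      else bTrial ps num

-- Source B's counting-up integer-square-root loop: while (root+1)*(root+1) <= hi: root += 1.
def bRootLoop (hi : Int) (root : Nat) : Nat :=
  if h : ((root : Int) + 1) * ((root : Int) + 1) ≤ hi then bRootLoop hi (root + 1) else root
termination_by (hi + 1 - root).toNat
decreasing_by
  have h1 : (root : Int) + 1 ≤ ((root : Int) + 1) * ((root : Int) + 1) := by nlinarith
  omega

-- Source B's prime-list construction: for k in range(2, root+1): if trial(primes,k): primes.append(k).
def bPrimes (root : Nat) : List Int :=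
  (PySem.List.pyRange 2 ((root : Int) + 1) 1).foldl
    (fun primes k => if bTrial primes k then primes ++ [k] else primes) []

def prime_index_and_value_alt (arr : List Int) : List Int :=
  let hi := (PySem.List.max? (((arr.length : Int) - 1) :: arr) (fun y => y)).getD 0  -- max([len(arr)-1]+arr); never None
  let root := bRootLoop hi 0
  let primes := bPrimes root
  (PySem.List.enumerate arr).foldl
    (fun out iv =>
      if (2 ≤ iv.1 && bTrial primes iv.1) && (2 ≤ iv.2 && bTrial primes iv.2)
      then out ++ [iv.2] else out) []

-- ===== PRECONDITION & SPEC =====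
def Spec_prime_index_and_value (arr : List Int) (out : List Int) : Prop := out = prime_index_and_value_alt arr
instance (arr : List Int) (out : List Int) : Decidable (Spec_prime_index_and_value arr out) := by unfold Spec_prime_index_and_value; infer_instance

-- ===== CLAIM (what is proved, stated in full; the proofs are below) =====
def Claim_equal_prime_index_and_value : Prop := ∀ (arr : List Int), Dom_prime_index_and_value arr → Spec_prime_index_and_value arr (prime_index_and_value arr)

-- ===== LEMMAS AND PROOFS =====

-- the list of all primes in [2, root], ascending, as integers
def primesUpTo (root : Nat) : List Int :=
  (PySem.List.pyRange 2 ((root : Int) + 1) 1).filter (fun p => decide (Nat.Prime p.toNat))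

-- A's is_prime answers true exactly on the integer primes (≥ 2).
lemma aIsPrime_iff (num : Int) : aIsPrime num = true ↔ 2 ≤ num ∧ num.toNat.Prime := by
  by_cases hlt : num < 2
  · simp only [aIsPrime, if_pos hlt]
    constructor
    · intro h; cases h
    · rintro ⟨h, _⟩; omega
  · have h2 : 2 ≤ num := by omega
    simp only [aIsPrime, if_neg hlt]
    constructor
    · intro h
      refine ⟨h2, ?_⟩
      by_cases hany : (PySem.List.pyRange 2 ((Nat.sqrt num.toNat : Int) + 1) 1).any
            (fun i => PySem.Int.mod num i == 0) = true
      · rw [if_pos hany] at h; cases h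
      · rw [Nat.prime_def_le_sqrt]
        refine ⟨by omega, fun d hd hdsqrt hdvd => ?_⟩
        apply hany
        rw [List.any_eq_true]
        refine ⟨(d : Int), ?_, ?_⟩
        · rw [PySem.List.mem_pyRange_one]
          constructor
          · exact_mod_cast hd
          · omega
        · rw [beq_iff_eq, PySem.Int.mod_eq_zero_iff_dvd]
          have : (d : Int) ∣ (num.toNat : Int) := Int.natCast_dvd_natCast.mpr hdvd
          rwa [Int.toNat_of_nonneg (by omega)] at this
    · rintro ⟨-, hp⟩
      rw [if_neg]
      rw [List.any_eq_true]
      push Not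
      rintro i hi hmod
      rw [PySem.List.mem_pyRange_one] at hi
      rw [beq_iff_eq, PySem.Int.mod_eq_zero_iff_dvd] at hmod
      have hd2 : 2 ≤ i.toNat := by omega
      have hdsqrt : i.toNat ≤ Nat.sqrt num.toNat := by omega
      have hdvd : i.toNat ∣ num.toNat := by
        have h1 : i = (i.toNat : Int) := by omega
        rw [h1] at hmod
        have h' : num = (num.toNat : Int) := by omega
        rw [h'] at hmod
        exact_mod_cast hmod
      exact (Nat.prime_def_le_sqrt.mp hp).2 i.toNat hd2 hdsqrt hdvd

lemma mem_primesUpTo {root : Nat} {p : Int} :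
    p ∈ primesUpTo root ↔ 2 ≤ p ∧ Nat.Prime p.toNat ∧ p ≤ root := by
  unfold primesUpTo
  rw [List.mem_filter, PySem.List.mem_pyRange_one]
  simp only [decide_eq_true_eq]
  constructor
  · rintro ⟨⟨h2, hlt⟩, hp⟩; exact ⟨h2, hp, by omega⟩
  · rintro ⟨h2, hp, hle⟩; exact ⟨⟨h2, by omega⟩, hp⟩

-- break elimination: on a nondecreasing list of numbers ≥ 2, trial's early break is harmless
lemma bTrial_eq_forall (ps : List Int) (num : Int)
    (hs : ps.Pairwise (· ≤ ·)) (h2 : ∀ p ∈ ps, 2 ≤ p) :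
    bTrial ps num = true ↔ ∀ p ∈ ps, p * p ≤ num → ¬ p ∣ num := by
  induction ps with
  | nil => simp [bTrial]
  | cons p ps ih =>
    rw [List.pairwise_cons] at hs
    by_cases hbr : p * p > num
    · rw [show bTrial (p :: ps) num = true from by rw [bTrial, if_pos hbr]]
      constructor
      · intro _ q hq hqq
        rcases List.mem_cons.mp hq with rfl | hq
        · exact absurd hqq (not_le.mpr hbr)
        · exfalso
          have hpq : p ≤ q := hs.1 q hq
          have hp2 : 2 ≤ p := h2 p (List.mem_cons_self)
          nlinarith
      · intro _; rfl
    · have hle : p * p ≤ num := by omega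
      by_cases hmod : PySem.Int.mod num p == 0
      · rw [show bTrial (p :: ps) num = false from by rw [bTrial, if_neg hbr, if_pos hmod]]
        rw [beq_iff_eq, PySem.Int.mod_eq_zero_iff_dvd] at hmod
        constructor
        · intro h; cases h
        · intro h; exact absurd (h p List.mem_cons_self hle) (fun hn => hn hmod)
      · rw [show bTrial (p :: ps) num = bTrial ps num from by
            rw [bTrial, if_neg hbr, if_neg (by simpa using hmod)]]
        rw [ih hs.2 (fun q hq => h2 q (List.mem_cons_of_mem p hq))]
        rw [beq_iff_eq] at hmod
        constructor
        · intro h q hq hqq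
          rcases List.mem_cons.mp hq with rfl | hq
          · intro hd; exact hmod ((PySem.Int.mod_eq_zero_iff_dvd num q).mpr hd)
          · exact h q hq hqq
        · intro h q hq hqq; exact h q (List.mem_cons_of_mem p hq) hqq

lemma sorted_primesUpTo (root : Nat) : (primesUpTo root).Pairwise (· ≤ ·) :=
  ((PySem.List.pairwise_lt_pyRange_one 2 ((root:Int)+1)).filter _).imp (fun h => le_of_lt h)

-- if every prime whose square is ≤ num is ≤ root, trial against primesUpTo root decides primality
lemma bTrial_correct (root : Nat) (num : Int) (h2 : 2 ≤ num)
    (hc : ∀ p : Nat, p.Prime → (p : Int) * p ≤ num → p ≤ root) :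
    (bTrial (primesUpTo root) num = true ↔ num.toNat.Prime) := by
  rw [bTrial_eq_forall _ _ (sorted_primesUpTo root) (fun p hp => (mem_primesUpTo.mp hp).1)]
  have hnum : num = (num.toNat : Int) := by omega
  constructor
  · intro h
    by_contra hnp
    have hqp : num.toNat.minFac.Prime := Nat.minFac_prime (by omega)
    have hqq : (num.toNat.minFac : Int) * num.toNat.minFac ≤ num := by
      have := Nat.minFac_sq_le_self (n := num.toNat) (by omega) hnp
      rw [pow_two] at this
      rw [hnum]; exact_mod_cast this
    have hqdvd : (num.toNat.minFac : Int) ∣ num := by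
      rw [hnum]; exact_mod_cast Nat.minFac_dvd num.toNat
    have hqmem : (num.toNat.minFac : Int) ∈ primesUpTo root :=
      mem_primesUpTo.mpr ⟨by exact_mod_cast hqp.two_le, by simpa using hqp,
        by exact_mod_cast hc _ hqp hqq⟩
    exact h _ hqmem hqq hqdvd
  · intro hp p hpmem hpp hpdvd
    obtain ⟨hp2, hpprime, -⟩ := mem_primesUpTo.mp hpmem
    have hdvdnat : p.toNat ∣ num.toNat := by
      have h1 : p = (p.toNat : Int) := by omega
      rw [h1] at hpdvd; rw [hnum] at hpdvd
      exact_mod_cast hpdvd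
    rcases (hp.eq_one_or_self_of_dvd p.toNat hdvdnat) with h1 | hself
    · omega
    · have : p = num := by omega
      subst this
      nlinarith

-- the generated prime list is exactly the primes up to root, in order
lemma bPrimes_eq (root : Nat) : bPrimes root = primesUpTo root := by
  induction root with
  | zero => rfl
  | succ j ih =>
    rcases Nat.eq_zero_or_pos j with rfl | hj
    · rfl
    · have hsplit : PySem.List.pyRange 2 ((j : Int) + 1 + 1) 1
          = PySem.List.pyRange 2 ((j : Int) + 1) 1 ++ [(j : Int) + 1] :=
        PySem.List.pyRange_one_succ_right (a := 2) (b := (j : Int) + 1) (by omega)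
      have hb : bTrial (primesUpTo j) ((j : Int) + 1) = decide (Nat.Prime (j + 1)) := by
        rw [Bool.eq_iff_iff, decide_eq_true_iff]
        have := bTrial_correct j ((j : Int) + 1) (by omega)
          (fun p hp hpp => by
            have h2p : (2 : Int) ≤ (p : Int) := by exact_mod_cast hp.two_le
            have : (2 : Int) * p ≤ (p : Int) * p := by nlinarith
            omega)
        rw [this]
        norm_num
      unfold bPrimes primesUpTo
      push_cast
      rw [hsplit, List.foldl_append, List.filter_append]
      rw [show (PySem.List.pyRange 2 ((j : Int) + 1) 1).foldl
          (fun primes k => if bTrial primes k then primes ++ [k] else primes) [] = primesUpTo j from ih]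
      simp only [List.foldl_cons, List.foldl_nil, List.filter_cons, List.filter_nil, hb]
      have htoNat : ((j : Int) + 1).toNat = j + 1 := by omega
      rw [htoNat]
      by_cases hp : Nat.Prime (j + 1)
      · simp [hp, primesUpTo]
      · simp [hp, primesUpTo]

-- the root loop stops at a value whose successor squared exceeds hi
lemma bRootLoop_gt (hi : Int) (root : Nat) :
    hi < ((bRootLoop hi root : Int) + 1) * ((bRootLoop hi root : Int) + 1) := by
  induction root using bRootLoop.induct hi with
  | case1 r h ih => rw [bRootLoop]; simp only [dif_pos h]; exact ih
  | case2 r h => rw [bRootLoop]; simp only [dif_neg h]; omega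

-- pointwise agreement of the two primality tests for numbers ≤ hi
lemma test_agree (hi x : Int) (hx : x ≤ hi) :
    aIsPrime x = ((decide (2 ≤ x)) && bTrial (bPrimes (bRootLoop hi 0)) x) := by
  rw [bPrimes_eq]
  by_cases h2 : 2 ≤ x
  · have hc : ∀ p : Nat, p.Prime → (p : Int) * p ≤ x → p ≤ bRootLoop hi 0 := by
      intro p hp hpp
      by_contra hgt
      have h1 : ((bRootLoop hi 0 : Int) + 1) ≤ (p : Int) := by omega
      have h0 : (0 : Int) ≤ (bRootLoop hi 0 : Int) + 1 := by positivity
      have := mul_le_mul h1 h1 h0 (by exact_mod_cast Nat.zero_le p)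
      have := bRootLoop_gt hi 0
      omega
    rw [Bool.eq_iff_iff, aIsPrime_iff]
    simp [bTrial_correct _ x h2 hc, h2]
  · have ha : aIsPrime x = false := by
      cases h : aIsPrime x
      · rfl
      · exact absurd ((aIsPrime_iff x).mp h).1 h2
    rw [ha]
    have : decide (2 ≤ x) = false := by simp [h2]
    rw [this, Bool.false_and]

-- ===== VERDICT (by name: the statement is the Claim_ definition above) =====
theorem prime_index_and_value_spec : Claim_equal_prime_index_and_value := by
  intro arr _
  unfold Spec_prime_index_and_value prime_index_and_value prime_index_and_value_alt
  dsimp only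
  rw [PySem.List.foldl_append_if _ (fun iv : Int × Int => iv.2), List.nil_append]
  apply congrArg
  apply List.filter_congr
  intro iv hmem
  rw [PySem.List.max?_id_cons, Option.getD_some]
  obtain ⟨k, hk, rfl⟩ := (PySem.List.mem_enumerate_iff arr 0 iv).mp hmem
  have hmax := PySem.List.le_foldl_max arr ((arr.length : Int) - 1)
  have h1 : (0 : Int) + (k : Int) ≤ arr.foldl max ((arr.length : Int) - 1) := by
    have := hmax.1; omega
  have h2 : arr[k] ≤ arr.foldl max ((arr.length : Int) - 1) :=
    hmax.2 _ (List.getElem_mem hk)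
  rw [test_agree _ _ h1, test_agree _ _ h2]
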